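-- pv_equiv track=rewrite | github.com/sipyourdrink-ltd/bernstein | src/bernstein/core/tasks/task_lifecycle.py | _escalate_model
-- ===== SOURCE A (Python) =====
-- _MODEL_LADDER = ["haiku", "sonnet", "opus"]
--
-- def _escalate_model(current_model: str) -> str:
--     """Return the next model in the escalation ladder, capped at 'opus'."""
--     model_lower = current_model.lower()
--     model_idx = 1  # default to sonnet position
--     for i, name in enumerate(_MODEL_LADDER):
--         if name in model_lower:
--             model_idx = i
--             break
--     return _MODEL_LADDER[min(model_idx + 1, len(_MODEL_LADDER) - 1)]
-- ===== SOURCE B (Python) =====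
-- def _escalate_model(current_model: str) -> str:
--     """Return the next model in the escalation ladder, capped at 'opus'."""
--     return "sonnet" if "haiku" in current_model.lower() else "opus"
-- ===== Notes on version B (the rewrite author's own statement) =====
-- stated objective: simpler
-- what changed: Replaced the ladder scan with enumerate/break and the +1-capped index arithmetic by a single closed-form conditional: 'sonnet' if 'haiku' appears in the lowered name, else 'opus' (sonnet, opus and no-match all land on 'opus' in A).
import Mathlib
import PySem

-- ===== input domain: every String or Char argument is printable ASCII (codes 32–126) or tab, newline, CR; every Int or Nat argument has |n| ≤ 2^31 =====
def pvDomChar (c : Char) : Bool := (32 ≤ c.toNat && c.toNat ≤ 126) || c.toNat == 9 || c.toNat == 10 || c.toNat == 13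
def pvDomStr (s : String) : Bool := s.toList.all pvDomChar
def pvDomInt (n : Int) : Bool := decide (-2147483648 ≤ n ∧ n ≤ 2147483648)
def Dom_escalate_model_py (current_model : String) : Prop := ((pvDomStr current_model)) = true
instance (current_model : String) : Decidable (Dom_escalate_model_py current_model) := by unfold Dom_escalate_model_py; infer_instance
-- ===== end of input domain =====

-- B replaces A's enumerate/break ladder scan and capped-index arithmetic by one closed-form conditional (objective: simpler).

-- ===== PORT A =====
def pvModelLadder : List String := ["haiku", "sonnet", "opus"]

-- the 'for i, name in enumerate(_MODEL_LADDER): if name in model_lower: model_idx = i; break'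
def pvEscLoop (model_lower : String) : List (Int × String) → Int
  | [] => 1  -- default to sonnet position (loop finished without break)
  | (i, name) :: rest =>
      if PySem.Str.isIn name model_lower then i else pvEscLoop model_lower rest

def escalate_model_py (current_model : String) : String :=
  let model_lower := PySem.Str.lower current_model
  let model_idx := pvEscLoop model_lower (PySem.List.enumerate pvModelLadder)
  -- index min(model_idx+1, 2) is always in range, so pyGetD's default is never used
  PySem.List.pyGetD pvModelLadder (min (model_idx + 1) ((pvModelLadder.length : Int) - 1)) ""

-- ===== PORT B =====
def escalate_model_py_alt (current_model : String) : String :=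
  if PySem.Str.isIn "haiku" (PySem.Str.lower current_model) then "sonnet" else "opus"

-- ===== PRECONDITION & SPEC =====
def Spec_escalate_model_py (current_model : String) (out : String) : Prop := out = escalate_model_py_alt current_model
instance (current_model : String) (out : String) : Decidable (Spec_escalate_model_py current_model out) := by unfold Spec_escalate_model_py; infer_instance

-- ===== CLAIM (what is proved, stated in full; the proofs are below) =====
def Claim_equal_escalate_model_py : Prop := ∀ (current_model : String), Dom_escalate_model_py current_model → Spec_escalate_model_py current_model (escalate_model_py current_model)

-- ===== LEMMAS AND PROOFS =====

-- ===== VERDICT (by name: the statement is the Claim_ definition above) =====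
theorem escalate_model_py_spec : Claim_equal_escalate_model_py := by
  intro s _
  unfold Spec_escalate_model_py escalate_model_py escalate_model_py_alt pvModelLadder
  simp only [PySem.List.enumerate, pvEscLoop]
  by_cases h1 : PySem.Str.isIn "haiku" (PySem.Str.lower s) <;>
    by_cases h2 : PySem.Str.isIn "sonnet" (PySem.Str.lower s) <;>
      by_cases h3 : PySem.Str.isIn "opus" (PySem.Str.lower s) <;>
        simp_all [PySem.List.pyGetD]
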